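-- pv_equiv track=rewrite | github.com/kimchsi90/chansik | online_test/마키나락스_3번.py | solution
-- ===== SOURCE A (Python) =====
-- from collections import deque
--
-- def solution(p):
--     answer = 0
--     p.sort()
--     dq = deque(p)
--
--     while dq: # O(n)
--         curr = dq.popleft() # O(1)
--         for item in dq.copy(): # O(n)
--             if curr < item: # O(1)
--                 dq.remove(item) # O(n)
--                 curr = item # O(1)
--                 answer += 1 # O(1)
--     return answer
-- ===== SOURCE B (Python) =====
-- from collections import Counter
--
-- def solution(p):
--     # Same return value as A via a closed form: each pass of A's greedy loop
--     # removes one occurrence of every distinct value, so the number of passes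
--     # is the maximum multiplicity and the answer is len(p) minus it.
--     # (A sorts p in place; this version does not mutate p.)
--     if not p:
--         return 0
--     return len(p) - max(Counter(p).values())
-- ===== Notes on version B (the rewrite author's own statement) =====
-- stated objective: faster
-- what changed: Replaced the sort plus repeated deque scans/removals with a single Counter pass: answer = len(p) - max multiplicity, since each greedy pass removes exactly one occurrence of every distinct value.
import Mathlib
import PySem

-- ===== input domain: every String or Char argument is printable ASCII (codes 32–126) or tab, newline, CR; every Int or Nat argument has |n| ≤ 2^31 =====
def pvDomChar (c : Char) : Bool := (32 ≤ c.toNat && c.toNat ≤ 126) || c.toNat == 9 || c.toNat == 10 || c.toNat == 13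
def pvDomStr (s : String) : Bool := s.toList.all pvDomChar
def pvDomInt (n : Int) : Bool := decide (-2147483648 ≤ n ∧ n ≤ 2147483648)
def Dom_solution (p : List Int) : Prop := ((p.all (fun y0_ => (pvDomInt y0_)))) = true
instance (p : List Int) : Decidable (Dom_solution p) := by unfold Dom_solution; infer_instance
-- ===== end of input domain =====

-- B replaces A's sort + repeated deque scans/removals by one Counter pass (len(p) - max multiplicity);
-- equivalence is about the RETURN value only: A sorts its argument in place, B does not mutate it.

-- ===== PORT A =====
-- the 'for item in dq.copy():' loop: items is the fixed snapshot, dq the mutating deque.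
-- dq.remove(item) cannot raise here (item always comes from a snapshot of dq and only earlier
-- elements have been removed); '.getD dq' is the stand-in for that unreachable ValueError.
def pyInner : List Int → List Int → Int → Int → List Int × Int × Int
  | [], dq, curr, ans => (dq, curr, ans)
  | it :: rest, dq, curr, ans =>
    if curr < it then pyInner rest ((PySem.List.remove? dq it).getD dq) it (ans + 1)
    else pyInner rest dq curr ans

-- the 'while dq:' loop; fuel = initial length is a totality guard only (each pass shrinks dq)
def pyOuter : Nat → List Int → Int → Int
  | 0, _, ans => ans
  | _ + 1, [], ans => ans
  | f + 1, curr :: rest, ans =>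
    let r := pyInner rest rest curr ans
    pyOuter f r.1 r.2.2

def solution (p : List Int) : Int :=
  let s := PySem.List.sorted p (fun x => x) false
  pyOuter s.length s 0

-- ===== PORT B =====
def solution_alt (p : List Int) : Int :=
  if p.isEmpty then 0
  else (p.length : Int) -
    ((PySem.List.max? (PySem.Dict.counter p).values (fun x => x)).getD 0)

-- ===== PRECONDITION & SPEC =====
def Spec_solution (p : List Int) (out : Int) : Prop := out = solution_alt p
instance (p : List Int) (out : Int) : Decidable (Spec_solution p out) := by unfold Spec_solution; infer_instance

-- ===== CLAIM (what is proved, stated in full; the proofs are below) =====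
def Claim_equal_solution : Prop := ∀ (p : List Int), Dom_solution p → Spec_solution p (solution p)

-- ===== LEMMAS AND PROOFS =====

-- one pass of the inner loop as a pure recursion: (kept elements, final curr, #removed)
def passF (c : Int) : List Int → List Int × Int × Nat
  | [] => ([], c, 0)
  | x :: xs =>
    if c < x then
      let r := passF x xs
      (r.1, r.2.1, r.2.2 + 1)
    else
      let r := passF c xs
      (x :: r.1, r.2.1, r.2.2)

def listMax (xs : List Nat) : Nat := xs.foldr max 0

def maxCount (l : List Int) : Nat := listMax (l.map (fun v => l.count v))

theorem le_listMax {xs : List Nat} {x : Nat} (h : x ∈ xs) : x ≤ listMax xs := by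
  induction xs with
  | nil => cases h
  | cons a t ih =>
    rcases List.mem_cons.mp h with rfl | h'
    · exact le_max_left _ _
    · exact le_trans (ih h') (le_max_right _ _)

theorem listMax_mem {xs : List Nat} (h : xs ≠ []) : listMax xs ∈ xs := by
  induction xs with
  | nil => exact absurd rfl h
  | cons a t ih =>
    show max a (listMax t) ∈ a :: t
    by_cases ht : t = []
    · subst ht; simp [listMax]
    · rcases max_choice a (listMax t) with h1 | h1 <;> rw [h1]
      · exact List.mem_cons_self ..
      · exact List.mem_cons_of_mem _ (ih ht)

theorem count_le_maxCount {l : List Int} (v : Int) (h : v ∈ l) : l.count v ≤ maxCount l :=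
  le_listMax (List.mem_map.mpr ⟨v, h, rfl⟩)

theorem maxCount_mem {l : List Int} (h : l ≠ []) : ∃ v ∈ l, l.count v = maxCount l := by
  have hm : maxCount l ∈ l.map (fun v => l.count v) :=
    listMax_mem (by simpa using h)
  rcases List.mem_map.mp hm with ⟨v, hv, he⟩
  exact ⟨v, hv, he⟩

theorem maxCount_pos {l : List Int} (h : l ≠ []) : 1 ≤ maxCount l := by
  rcases List.exists_mem_of_ne_nil l h with ⟨x, hx⟩
  have := count_le_maxCount x hx
  have hc : 1 ≤ l.count x := List.one_le_count_iff.mpr hx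
  omega

theorem maxCount_le_length (l : List Int) : maxCount l ≤ l.length := by
  by_cases h : l = []
  · subst h; simp [maxCount, listMax]
  · rcases maxCount_mem h with ⟨v, _, he⟩
    rw [← he]; exact List.count_le_length

-- a pass decrements every count by one (Nat subtraction), so maxCount drops by one
theorem maxCount_pred {l l' : List Int} (h : ∀ v, l'.count v = l.count v - 1) :
    maxCount l' = maxCount l - 1 := by
  by_cases hl : l = []
  · subst hl
    have : l' = [] := by
      rcases l' with _ | ⟨x, t⟩
      · rfl
      · have := h x; simp at this
    subst this; rfl
  · have hub : maxCount l' ≤ maxCount l - 1 := by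
      by_cases h' : l' = []
      · subst h'; simp [maxCount, listMax]
      · rcases maxCount_mem h' with ⟨v, hv, he⟩
        have h1 : 1 ≤ l'.count v := List.one_le_count_iff.mpr hv
        have hvl : v ∈ l := by
          have := h v
          exact List.one_le_count_iff.mp (by omega)
        have := count_le_maxCount v hvl
        have := h v
        omega
    by_cases h2 : maxCount l ≤ 1
    · omega
    · rcases maxCount_mem hl with ⟨v, hv, he⟩
      have hc' : l'.count v = maxCount l - 1 := by rw [h v, he]
      have hv' : v ∈ l' := List.one_le_count_iff.mp (by omega)
      have := count_le_maxCount v hv'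
      omega

theorem remove?_append_left {kept rest : List Int} {x : Int}
    (h : ∀ y ∈ kept, y ≠ x) :
    PySem.List.remove? (kept ++ x :: rest) x = some (kept ++ rest) := by
  induction kept with
  | nil => simp [PySem.List.remove?_cons_self]
  | cons a t ih =>
    have ha : a ≠ x := h a (List.mem_cons_self ..)
    rw [List.cons_append, PySem.List.remove?_cons_of_ne _ ha,
        ih (fun y hy => h y (List.mem_cons_of_mem _ hy))]
    simp

-- the inner loop with snapshot 'items', deque 'kept ++ items', current 'c':
theorem pyInner_eq (items : List Int) :
    ∀ (kept : List Int) (c a : Int),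
      (kept ++ items).Pairwise (· ≤ ·) → (∀ x ∈ kept, x ≤ c) →
      pyInner items (kept ++ items) c a =
        (kept ++ (passF c items).1, (passF c items).2.1, a + ((passF c items).2.2 : Int)) := by
  induction items with
  | nil => intro kept c a _ _; simp [pyInner, passF]
  | cons x rest ih =>
    intro kept c a hs hk
    by_cases hcx : c < x
    · have hne : ∀ y ∈ kept, y ≠ x := fun y hy => ne_of_lt (lt_of_le_of_lt (hk y hy) hcx)
      have hrm := remove?_append_left (rest := rest) hne
      have hs' : (kept ++ rest).Pairwise (· ≤ ·) :=
        hs.sublist (List.Sublist.append_left (List.sublist_cons_self x rest) kept)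
      have hk' : ∀ y ∈ kept, y ≤ x := fun y hy => le_of_lt (lt_of_le_of_lt (hk y hy) hcx)
      simp only [pyInner, if_pos hcx, hrm, Option.getD_some]
      rw [ih kept x (a + 1) hs' hk']
      simp only [passF, if_pos hcx, Prod.mk.injEq]
      refine ⟨trivial, trivial, ?_⟩
      push_cast
      ring
    · have hxc : x ≤ c := not_lt.mp hcx
      have hk' : ∀ y ∈ kept ++ [x], y ≤ c := by
        intro y hy
        rcases List.mem_append.mp hy with h1 | h2
        · exact hk y h1
        · simp at h2; subst h2; exact hxc
      have hrw : kept ++ x :: rest = (kept ++ [x]) ++ rest := by simp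
      simp only [pyInner, if_neg hcx]
      rw [hrw, ih (kept ++ [x]) c a (by rw [← hrw]; exact hs) hk']
      simp only [passF, if_neg hcx, Prod.mk.injEq]
      simp

theorem passF_sublist (c : Int) (l : List Int) : (passF c l).1.Sublist l := by
  induction l generalizing c with
  | nil => simp [passF]
  | cons x xs ih =>
    by_cases h : c < x
    · simp only [passF, if_pos h]
      exact (ih x).trans (List.sublist_cons_self x xs)
    · simp only [passF, if_neg h]
      exact (ih c).cons₂ x

theorem passF_length (c : Int) (l : List Int) :
    (passF c l).1.length + (passF c l).2.2 = l.length := by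
  induction l generalizing c with
  | nil => simp [passF]
  | cons x xs ih =>
    by_cases h : c < x
    · simp only [passF, if_pos h]
      have := ih x; simp; omega
    · simp only [passF, if_neg h]
      have := ih c; simp; omega

-- on a sorted list, the pass removes one occurrence of each value above c (Nat subtraction)
theorem passF_count (c : Int) (l : List Int) (hs : l.Pairwise (· ≤ ·)) (v : Int) :
    (passF c l).1.count v = l.count v - (if c < v then 1 else 0) := by
  induction l generalizing c with
  | nil => simp [passF]
  | cons x xs ih =>
    have hs' : xs.Pairwise (· ≤ ·) := hs.tail
    have hxle : ∀ y ∈ xs, x ≤ y := (List.pairwise_cons.mp hs).1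
    by_cases h : c < x
    · simp only [passF, if_pos h]
      rw [ih x hs']
      by_cases hvx : v = x
      · subst hvx
        simp [h]
      · by_cases hxv : x < v
        · have hcv : c < v := lt_trans h hxv
          have hne : (x == v) = false := by simp [Ne.symm hvx]
          simp [List.count_cons, hne, hxv, hcv]
        · have hvltx : v < x := lt_of_le_of_ne (not_lt.mp hxv) hvx
          have hnot : xs.count v = 0 := by
            rw [List.count_eq_zero]
            intro hm
            exact absurd (hxle v hm) (not_le.mpr hvltx)
          have hne : (x == v) = false := by simp [Ne.symm hvx]
          simp [List.count_cons, hne, hxv, hnot]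
    · simp only [passF, if_neg h]
      rw [List.count_cons, ih c hs', List.count_cons]
      by_cases hvx : v = x
      · subst hvx
        have hncv : ¬ (c < v) := fun hcv => h hcv
        simp [hncv]
      · have hne : (x == v) = false := by simp [Ne.symm hvx]
        simp [hne]

-- the outer loop on a sorted deque computes length - maxCount
theorem pyOuter_eq (f : Nat) :
    ∀ (l : List Int) (a : Int), l.Pairwise (· ≤ ·) → maxCount l ≤ f →
      pyOuter f l a = a + (l.length : Int) - (maxCount l : Int) := by
  induction f with
  | zero =>
    intro l a _ hf
    rcases l with _ | ⟨c, rest⟩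
    · simp [pyOuter, maxCount, listMax]
    · exact absurd hf (by have := maxCount_pos (l := c :: rest) (by simp); omega)
  | succ f ih =>
    intro l a hs hf
    rcases l with _ | ⟨c, rest⟩
    · simp [pyOuter, maxCount, listMax]
    · have hinner := pyInner_eq rest [] c a (by simpa using hs.tail) (by simp)
      simp only [List.nil_append] at hinner
      have hcle : ∀ y ∈ rest, c ≤ y := (List.pairwise_cons.mp hs).1
      have hcount : ∀ v, (passF c rest).1.count v = (c :: rest).count v - 1 := by
        intro v
        rw [passF_count c rest hs.tail v, List.count_cons]
        by_cases hvc : v = c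
        · subst hvc
          simp
        · have hne : (c == v) = false := by simp [Ne.symm hvc]
          by_cases hcv : c < v
          · simp [hne, hcv]
          · have hvltc : v < c := lt_of_le_of_ne (not_lt.mp hcv) hvc
            have hnot : rest.count v = 0 := by
              rw [List.count_eq_zero]
              intro hm
              exact absurd (hcle v hm) (not_le.mpr hvltc)
            simp [hne, hcv, hnot]
      have hmax : maxCount (passF c rest).1 = maxCount (c :: rest) - 1 := maxCount_pred hcount
      have hpos : 1 ≤ maxCount (c :: rest) := maxCount_pos (by simp)
      have hsort' : (passF c rest).1.Pairwise (· ≤ ·) := hs.tail.sublist (passF_sublist c rest)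
      have hlen := passF_length c rest
      have hrec := ih (passF c rest).1 (a + ((passF c rest).2.2 : Int)) hsort' (by omega)
      show pyOuter (f + 1) (c :: rest) a = _
      simp only [pyOuter, hinner]
      rw [hrec]
      have hm1 : (maxCount (passF c rest).1 : Int) = (maxCount (c :: rest) : Int) - 1 := by
        rw [hmax]; omega
      have hl1 : ((passF c rest).1.length : Int) + ((passF c rest).2.2 : Int) = (rest.length : Int) := by
        exact_mod_cast hlen
      rw [hm1]
      simp only [List.length_cons]
      push_cast
      omega

-- maxCount is a permutation invariant
theorem maxCount_perm {l l' : List Int} (h : l.Perm l') : maxCount l = maxCount l' := by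
  have key : ∀ {a b : List Int}, a.Perm b → maxCount a ≤ maxCount b := by
    intro a b hp
    by_cases ha : a = []
    · subst ha; simp [maxCount, listMax]
    · rcases maxCount_mem ha with ⟨v, hv, he⟩
      rw [← he, hp.count_eq v]
      exact count_le_maxCount v (hp.mem_iff.mp hv)
  exact le_antisymm (key h) (key h.symm)

-- B's 'max(Counter(p).values())' is maxCount p
theorem max_counter_values (p : List Int) (hp : p ≠ []) :
    (PySem.List.max? (PySem.Dict.counter p).values (fun x => x)).getD 0 = (maxCount p : Int) := by
  have hvals : (PySem.Dict.counter p).values =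
      (PySem.Set.ofList p).map (fun k => ((p.count k : Int))) := by
    show ((PySem.Dict.counter p).items).map (·.2) = _
    rw [PySem.Dict.items_counter]
    simp
  have hne : (PySem.Dict.counter p).values ≠ [] := by
    rw [hvals]
    simp only [ne_eq, List.map_eq_nil_iff]
    intro h
    rcases List.exists_mem_of_ne_nil p hp with ⟨x, hx⟩
    have : x ∈ PySem.Set.ofList p := (PySem.Set.mem_ofList p x).mpr hx
    rw [h] at this; cases this
  rcases hm : PySem.List.max? (PySem.Dict.counter p).values (fun x => x) with _ | m
  · exact absurd ((PySem.List.max?_eq_none_iff _ _).mp hm) hne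
  · have hmem := PySem.List.max?_mem hm
    have hmax := PySem.List.max?_isMax hm
    rw [hvals] at hmem hmax
    rcases List.mem_map.mp hmem with ⟨v, hv, rfl⟩
    have hvp : v ∈ p := (PySem.Set.mem_ofList p v).mp hv
    simp only [Option.getD_some]
    have h1 : p.count v ≤ maxCount p := count_le_maxCount v hvp
    rcases maxCount_mem hp with ⟨u, hu, heu⟩
    have h2 := hmax ((p.count u : Int))
      (List.mem_map.mpr ⟨u, (PySem.Set.mem_ofList p u).mpr hu, rfl⟩)
    simp only at h2
    have h2' : p.count u ≤ p.count v := by exact_mod_cast h2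
    omega

-- ===== VERDICT (by name: the statement is the Claim_ definition above) =====
theorem solution_spec : Claim_equal_solution := by
  unfold Claim_equal_solution Spec_solution
  intro p _
  unfold solution solution_alt
  have hperm : (PySem.List.sorted p (fun x => x) false).Perm p :=
    PySem.List.sorted_perm p (fun x => x) false
  have hsorted : (PySem.List.sorted p (fun x => x) false).Pairwise (· ≤ ·) := by
    have := PySem.List.sorted_pairwise p (fun x => x)
    simpa using this
  by_cases hp : p = []
  · subst hp
    have hs : PySem.List.sorted ([] : List Int) (fun x => x) false = [] := hperm.eq_nil
    simp [hs, pyOuter]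
  · have hps : PySem.List.sorted p (fun x => x) false ≠ [] := by
      intro h
      exact hp (List.Perm.eq_nil (List.Perm.symm (h ▸ hperm)))
    rw [pyOuter_eq _ _ 0 hsorted (maxCount_le_length _)]
    rw [if_neg (by simpa [List.isEmpty_iff] using hp)]
    rw [max_counter_values p hp, maxCount_perm hperm, hperm.length_eq]
    ring
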